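-- pv_equiv track=rewrite | github.com/leanmzr/Projets-Scolaires | Projets/PLIO_2022-23/Reconnaissance d'image/main 1.py | verifcoord
-- ===== SOURCE A (Python) =====
-- def verifcoord(coord1, coord2):
--     espace = []
--     for i in range(10):
--         espace += [coord1 + i]
--         espace += [coord1 - i]
--     if coord2 in espace:
--         return True
--     else:
--         return False
-- ===== SOURCE B (Python) =====
-- def verifcoord(coord1, coord2):
--     return -9 <= coord2 - coord1 <= 9
-- ===== Notes on version B (the rewrite author's own statement) =====
-- stated objective: simpler
-- what changed: Replaces the 20-element list construction and membership scan with a direct closed-form check that the difference lies in [-9, 9].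
import Mathlib
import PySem

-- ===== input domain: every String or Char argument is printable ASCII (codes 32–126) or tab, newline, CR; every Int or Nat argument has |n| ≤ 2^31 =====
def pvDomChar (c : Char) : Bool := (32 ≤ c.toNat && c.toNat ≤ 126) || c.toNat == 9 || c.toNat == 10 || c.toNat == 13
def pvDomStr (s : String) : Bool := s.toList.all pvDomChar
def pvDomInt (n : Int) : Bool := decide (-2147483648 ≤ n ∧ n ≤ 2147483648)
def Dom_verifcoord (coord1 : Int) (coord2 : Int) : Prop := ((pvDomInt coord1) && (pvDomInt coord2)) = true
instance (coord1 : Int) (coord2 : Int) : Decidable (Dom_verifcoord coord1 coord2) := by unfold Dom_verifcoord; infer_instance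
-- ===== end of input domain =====

-- ===== PORT A =====
-- B replaces A's 20-element list build + membership scan by the closed-form check -9 ≤ coord2-coord1 ≤ 9 (simpler).
def verifcoord (coord1 : Int) (coord2 : Int) : Bool :=
  let espace :=
    (PySem.List.pyRange 0 10 1).foldl
      (fun acc i => (acc ++ [coord1 + i]) ++ [coord1 - i]) []
  if espace.contains coord2 then true else false

-- ===== PORT B =====
def verifcoord_alt (coord1 : Int) (coord2 : Int) : Bool :=
  decide (-9 ≤ coord2 - coord1 ∧ coord2 - coord1 ≤ 9)

-- ===== PRECONDITION & SPEC =====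
def Spec_verifcoord (coord1 : Int) (coord2 : Int) (out : Bool) : Prop := out = verifcoord_alt coord1 coord2
instance (coord1 : Int) (coord2 : Int) (out : Bool) : Decidable (Spec_verifcoord coord1 coord2 out) := by unfold Spec_verifcoord; infer_instance

-- ===== CLAIM (what is proved, stated in full; the proofs are below) =====
def Claim_equal_verifcoord : Prop := ∀ (coord1 : Int) (coord2 : Int), Dom_verifcoord coord1 coord2 → Spec_verifcoord coord1 coord2 (verifcoord coord1 coord2)

-- ===== LEMMAS AND PROOFS =====

-- ===== VERDICT (by name: the statement is the Claim_ definition above) =====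
theorem pyRange_0_10 : PySem.List.pyRange 0 10 1 = [0,1,2,3,4,5,6,7,8,9] := by
  rw [PySem.List.pyRange_one]
  simp [List.range_succ]

theorem verifcoord_spec : Claim_equal_verifcoord := by
  intro c1 c2 _
  unfold Spec_verifcoord
  simp only [verifcoord, verifcoord_alt, pyRange_0_10, List.foldl, List.nil_append,
    List.cons_append]
  rw [Bool.eq_iff_iff]
  simp only [List.contains_cons, List.contains_nil, Bool.or_false, Bool.if_false_right, decide_eq_true_eq,
    Bool.or_eq_true, beq_iff_eq, Bool.and_eq_true, and_true]
  omega
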